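-- pv_equiv track=rewrite | github.com/hienvm/TicTacToe-AI---Nh-m-19 | win_lose.py | can_lose_ln
-- ===== SOURCE A (Python) =====
-- from collections import deque
-- from typing import Iterable, Literal
--
-- def can_lose_ln(k: int, role: Literal['x', 'o'], ln: Iterable[str]):
--     window = deque(maxlen=k)    # window: một dãy k ô liên tiếp
--     # đếm sl các ô của mỗi bên trong window
--     op_cnt: int = 0
--
--     # Duyệt từng ô
--     for cell in ln:
--         # Thêm ô tiếp theo vào cuối window
--         window.append(cell)
--         if cell == role:
--             op_cnt += 1
--
--         if len(window) == k:
--             # Check xem có thể win ko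
--             if op_cnt == 0:
--                 return True
--
--             # loại bỏ phần tử đầu khi window đã đạt đủ kích thước k
--             first = window.popleft()
--             if first == role:
--                 op_cnt -= 1
--
--     return False
-- ===== SOURCE B (Python) =====
-- def can_lose_ln(k, role, ln):
--     # Single pass: length of the current run of consecutive non-role cells.
--     run = 0
--     for cell in ln:
--         run = 0 if cell == role else run + 1
--         if run >= k:
--             return True
--     return False
-- ===== Notes on version B (the rewrite author's own statement) =====
-- stated objective: simpler
-- what changed: Replaces the deque sliding window with role-count bookkeeping by a single integer counting the current run of consecutive non-role cells (a k-window with no role cells exists iff such a run reaches length k).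
import Mathlib
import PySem

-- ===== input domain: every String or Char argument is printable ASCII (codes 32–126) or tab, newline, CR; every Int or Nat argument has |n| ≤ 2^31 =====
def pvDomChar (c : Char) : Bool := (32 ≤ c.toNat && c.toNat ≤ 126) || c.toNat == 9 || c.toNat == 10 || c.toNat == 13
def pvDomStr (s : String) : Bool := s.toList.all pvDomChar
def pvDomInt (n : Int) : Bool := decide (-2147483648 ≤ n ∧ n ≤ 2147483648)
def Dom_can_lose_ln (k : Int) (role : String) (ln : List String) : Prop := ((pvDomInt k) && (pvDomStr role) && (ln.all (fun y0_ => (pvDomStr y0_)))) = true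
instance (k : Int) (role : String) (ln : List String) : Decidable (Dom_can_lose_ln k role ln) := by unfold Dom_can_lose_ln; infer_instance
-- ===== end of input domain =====

-- B replaces A's deque window + role-count with a single integer counting the current
-- run of consecutive non-role cells (objective: simpler).

-- ===== PORT A =====
-- Literal port of A's loop: window = deque(maxlen=k) (append trims from the left when
-- over maxlen), op_cnt, then the len==k / op_cnt==0 / popleft logic.  Where Python
-- raises (popleft on an empty deque, only reachable with k = 0 and first cell = role;
-- excluded by Pre_) the port returns false.
def aLoop (k : Int) (role : String) (window : List String) (opc : Int) : List String → Bool
  | [] => false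
  | cell :: rest =>
    let w0 := window ++ [cell]
    let w := if (w0.length : Int) > k then w0.tail else w0
    let opc1 := if cell == role then opc + 1 else opc
    if (w.length : Int) = k then
      if opc1 = 0 then true
      else
        match w with
        | [] => false           -- Python: IndexError from popleft; outside Pre_
        | first :: wrest => aLoop k role wrest (if first == role then opc1 - 1 else opc1) rest
    else aLoop k role w opc1 rest

def can_lose_ln (k : Int) (role : String) (ln : List String) : Bool :=
  aLoop k role [] 0 ln

-- ===== PORT B =====
def bLoop (k : Int) (role : String) (run : Int) : List String → Bool
  | [] => false
  | cell :: rest =>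
    let run1 := if cell == role then 0 else run + 1
    if run1 ≥ k then true else bLoop k role run1 rest

def can_lose_ln_alt (k : Int) (role : String) (ln : List String) : Bool :=
  bLoop k role 0 ln

-- ===== PRECONDITION & SPEC =====
-- Pre_ excludes exactly the inputs where A raises: k < 0 (deque(maxlen=k) raises
-- ValueError) and k = 0 with a first cell equal to role (popleft of the empty
-- window raises IndexError).  On every other input A returns.
def Pre_can_lose_ln (k : Int) (role : String) (ln : List String) : Prop :=
  1 ≤ k ∨ (k = 0 ∧ ln.head? ≠ some role)
instance (k : Int) (role : String) (ln : List String) : Decidable (Pre_can_lose_ln k role ln) := by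
  unfold Pre_can_lose_ln; infer_instance

def pvWitness_can_lose_ln : Int × String × List String := (2, "x", ["o", "x", "o", "o"])

def Spec_can_lose_ln (k : Int) (role : String) (ln : List String) (out : Bool) : Prop := out = can_lose_ln_alt k role ln
instance (k : Int) (role : String) (ln : List String) (out : Bool) : Decidable (Spec_can_lose_ln k role ln out) := by unfold Spec_can_lose_ln; infer_instance

-- ===== CLAIM (what is proved, stated in full; the proofs are below) =====
def Claim_equal_can_lose_ln : Prop := ∀ (k : Int) (role : String) (ln : List String), Dom_can_lose_ln k role ln → Pre_can_lose_ln k role ln → Spec_can_lose_ln k role ln (can_lose_ln k role ln)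

-- ===== LEMMAS AND PROOFS =====

-- Invariant: A's window splits as pre ++ suf where suf (length = B's run) holds only
-- non-role cells and pre, if non-empty, ends in a role cell; op_cnt is the window's
-- role count; the window has room (length + 1 ≤ k).
lemma loop_eq (k : Int) (role : String) :
    ∀ (ln pre suf : List String),
      1 ≤ k →
      (pre.length : Int) + (suf.length : Int) + 1 ≤ k →
      (∀ c ∈ suf, (c == role) = false) →
      (∀ x, pre.getLast? = some x → (x == role) = true) →
      aLoop k role (pre ++ suf) (((pre ++ suf).count role : Int)) ln
        = bLoop k role (suf.length : Int) ln := by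
  intro ln
  induction ln with
  | nil => intro pre suf _ _ _ _; simp [aLoop, bLoop]
  | cons cell rest ih =>
    intro pre suf hk hlen hsuf hpre
    simp only [aLoop, bLoop]
    have hnotrim : ¬ ((((pre ++ suf) ++ [cell]).length : Int) > k) := by
      simp only [List.length_append, List.length_cons, List.length_nil]
      push_cast
      omega
    rw [if_neg hnotrim]
    by_cases hc : (cell == role) = true
    · -- cell equals role: A's op_cnt goes up, B resets run to 0
      have hcell : cell = role := by exact eq_of_beq hc
      simp only [hc, reduceIte]
      have hr0 : ¬ ((0 : Int) ≥ k) := by omega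
      rw [if_neg hr0]
      by_cases hfull : ((((pre ++ suf) ++ [cell]).length : Int) = k)
      · rw [if_pos hfull]
        have hopc : ¬ (((pre ++ suf).count role : Int) + 1 = 0) := by
          have : (0:Int) ≤ ((pre ++ suf).count role : Int) := Int.natCast_nonneg _
          omega
        rw [if_neg hopc]
        -- window is non-empty (its length is k ≥ 1)
        match hw : (pre ++ suf) ++ [cell] with
        | [] => simp at hw
        | first :: wrest =>
          -- pop first; new state: window = wrest, run = 0
          have hcount : ((first :: wrest).count role) = (pre ++ suf).count role + 1 := by
            rw [← hw]; simp [List.count_append, List.count_cons, hc]; omega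
          have hcw : ((if (first == role) = true then (((pre ++ suf).count role : Int) + 1) - 1
                        else ((pre ++ suf).count role : Int) + 1))
                      = (wrest.count role : Int) := by
            by_cases hf : (first == role) = true
            · rw [if_pos hf]
              have : (first :: wrest).count role = wrest.count role + 1 := by
                simp [List.count_cons, hf]
              omega
            · rw [if_neg hf]
              have : (first :: wrest).count role = wrest.count role := by
                simp [List.count_cons, hf]
              omega
          change aLoop k role wrest _ rest = _
          rw [hcw]
          have := ih wrest [] hk (by
            have hl : wrest.length + 1 = ((pre ++ suf) ++ [cell]).length := by
              rw [hw]; simp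
            simp only [List.length_nil]
            have : ((((pre ++ suf) ++ [cell]).length : Int)) = k := hfull
            push_cast at this ⊢
            omega) (by simp) (by
            -- last of wrest is cell (= role), or wrest = []
            intro x hx
            have hlast : (first :: wrest).getLast? = some cell := by
              rw [← hw]; simp
            rw [List.getLast?_cons, hx] at hlast
            have hx' : x = cell := by simpa using hlast
            rw [hx', hcell]; simp)
          simpa using this
      · rw [if_neg hfull]
        have := ih ((pre ++ suf) ++ [cell]) [] hk (by
          simp only [List.length_nil, List.length_append, List.length_cons]
          simp only [List.length_append, List.length_cons, List.length_nil] at hfull hnotrim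
          push_cast at hfull hnotrim ⊢
          omega) (by simp) (by
          intro x hx
          have hlast : ((pre ++ suf) ++ [cell]).getLast? = some cell := by
            simp
          rw [hx] at hlast
          have hx' : x = cell := by simpa using hlast
          rw [hx', hcell]; simp)
        have hcnt : ((((pre ++ suf) ++ [cell]).count role : Nat) : Int)
            = (((pre ++ suf).count role : Nat) : Int) + 1 := by
          simp [List.count_append, List.count_cons, hc]; omega
        simp only [List.append_nil, List.length_nil, Nat.cast_zero] at this
        rw [hcnt] at this
        exact this
    · -- cell differs from role: run increments
      have hc' : (cell == role) = false := by simpa using hc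
      simp only [hc', Bool.false_eq_true, reduceIte]
      by_cases hfull : ((((pre ++ suf) ++ [cell]).length : Int) = k)
      · rw [if_pos hfull]
        by_cases hz : ((pre ++ suf).count role : Int) = 0
        · -- whole window non-role: A returns true; show B's run reaches k
          rw [if_pos hz]
          have hzn : (pre ++ suf).count role = 0 := by exact_mod_cast hz
          have hpre0 : pre = [] := by
            rcases List.eq_nil_or_concat pre with h | ⟨ys, y, rfl⟩
            · exact h
            · exfalso
              have hy : (y == role) = true := by
                apply hpre y
                simp [List.concat_eq_append]
              have hyr : y = role := eq_of_beq hy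
              rw [List.count_eq_zero] at hzn
              apply hzn
              rw [← hyr]
              simp [List.concat_eq_append]
          subst hpre0
          have : ((suf.length : Int) + 1 ≥ k) := by
            simp only [List.nil_append, List.length_append, List.length_cons,
              List.length_nil] at hfull
            push_cast at hfull
            omega
          rw [if_pos this]
        · rw [if_neg hz]
          -- A pops; B's run stays below k
          have hrun : ¬ ((suf.length : Int) + 1 ≥ k) := by
            intro h
            -- then run = window length, so pre = [] and window all non-role: count 0
            have hlen' : (pre.length : Int) + suf.length + 1 = k := by
              simp only [List.length_append, List.length_cons, List.length_nil] at hfull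
              push_cast at hfull
              omega
            have hpre0 : pre = [] := by
              have : (pre.length : Int) = 0 := by omega
              have : pre.length = 0 := by exact_mod_cast this
              exact List.length_eq_zero_iff.mp this
            subst hpre0
            apply hz
            have : suf.count role = 0 := by
              rw [List.count_eq_zero]
              intro hmem
              have := hsuf role hmem
              simp at this
            simp [this]
          rw [if_neg hrun]
          -- window non-empty with at least pre ≠ [] (else count would be 0)
          have hpne : pre ≠ [] := by
            intro h
            subst h
            apply hz
            have : suf.count role = 0 := by
              rw [List.count_eq_zero]
              intro hmem
              have := hsuf role hmem
              simp at this
            simp [this]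
          obtain ⟨v, pre', rfl⟩ := List.exists_cons_of_ne_nil hpne
          have hw : ((v :: pre') ++ suf) ++ [cell] = v :: (pre' ++ suf ++ [cell]) := by simp
          rw [hw]
          change aLoop k role (pre' ++ suf ++ [cell]) _ rest = _
          have hcw : ((if (v == role) = true then (((v :: pre') ++ suf).count role : Int) - 1
                        else (((v :: pre') ++ suf).count role : Int)))
                      = ((pre' ++ (suf ++ [cell])).count role : Int) := by
            have hcellcnt : (pre' ++ (suf ++ [cell])).count role = (pre' ++ suf).count role := by
              simp [List.count_append, List.count_singleton, hc']
            by_cases hv : (v == role) = true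
            · rw [if_pos hv]
              have : ((v :: pre') ++ suf).count role = (pre' ++ suf).count role + 1 := by
                simp [List.count_cons, List.count_append, hv]
              rw [hcellcnt]; omega
            · rw [if_neg hv]
              have : ((v :: pre') ++ suf).count role = (pre' ++ suf).count role := by
                simp [List.count_cons, List.count_append, hv]
              rw [hcellcnt]; omega
          rw [hcw]
          have := ih pre' (suf ++ [cell]) hk (by
            simp only [List.length_append, List.length_cons, List.length_nil] at hfull ⊢
            push_cast at hfull ⊢
            omega) (by
            intro c hcm
            rcases List.mem_append.mp hcm with h | h
            · exact hsuf c h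
            · simp at h; subst h; exact hc') (by
            intro x hx
            apply hpre x
            rcases List.eq_nil_or_concat pre' with h | ⟨ys, y, rfl⟩
            · subst h; simp at hx
            · rw [List.getLast?_cons, hx]; rfl)
          simp only [List.append_assoc] at this ⊢
          rw [this]
          simp
      · rw [if_neg hfull]
        have hrun : ¬ ((suf.length : Int) + 1 ≥ k) := by
          have : (0:Int) ≤ (pre.length : Int) := Int.natCast_nonneg _
          simp only [List.length_append, List.length_cons, List.length_nil] at hfull hnotrim
          push_cast at hfull hnotrim
          omega
        rw [if_neg hrun]
        have := ih pre (suf ++ [cell]) hk (by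
          simp only [List.length_append, List.length_cons, List.length_nil] at hfull hnotrim ⊢
          push_cast at hfull hnotrim ⊢
          omega) (by
          intro c hcm
          rcases List.mem_append.mp hcm with h | h
          · exact hsuf c h
          · simp at h; subst h; exact hc') hpre
        have hcnt : (((pre ++ (suf ++ [cell])).count role : Nat) : Int)
            = (((pre ++ suf).count role : Nat) : Int) := by
          simp [List.count_append, List.count_cons, hc']
        rw [hcnt] at this
        simp only [List.append_assoc] at this ⊢
        rw [this]
        simp

-- ===== VERDICT (by name: the statement is the Claim_ definition above) =====
theorem can_lose_ln_spec : Claim_equal_can_lose_ln := by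
  intro k role ln _ hpre
  unfold Spec_can_lose_ln can_lose_ln can_lose_ln_alt
  rcases hpre with hk | ⟨hk0, hhead⟩
  · have := loop_eq k role ln [] [] hk (by simp; omega) (by simp) (by simp)
    simpa using this
  · subst hk0
    -- k = 0 and the first cell (if any) differs from role: both programs decide on it
    cases ln with
    | nil => simp [aLoop, bLoop]
    | cons c cs =>
      have hc : (c == role) = false := by
        simp only [List.head?] at hhead
        simp only [beq_eq_false_iff_ne]
        intro h; exact hhead (by rw [h])
      simp [aLoop, bLoop, hc]
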